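-- pv_equiv track=rewrite | github.com/HardM00N/BOJ | 프로그래머스/Lv.1/신고 결과 받기.py | solution
-- ===== SOURCE A (Python) =====
-- from collections import Counter
--
-- def solution(id_list, report, k):
--     db = {}
--
--     for id in id_list:                              # 각 유저의 신고 내용을 공집합으로 초기화 (동일 유저의 중복 신고 제거를 위한 set)
--         db[id] = set()                              # {'muzi': set(), 'frodo': set(), 'apeach': set(), 'neo': set()}
--
--     for r in report:
--         name, target = r.split()
--         db[name].add(target)                        # {'muzi': {'neo', 'frodo'}, 'frodo': {'neo'}, 'apeach': {'muzi', 'frodo'}, 'neo': set()}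
--
--     report_cnt = []                                 # 신고당한 횟수 누적
--
--     for id in db.keys():
--         if db[id]:
--             report_cnt += list(db[id])              # ['neo', 'frodo', 'neo', 'muzi', 'frodo']
--
--     report_cnt = Counter(report_cnt)                # Counter({'frodo': 2, 'neo': 2, 'muzi': 1})
--
--     answer = []
--
--     for _, value in db.items():                     # db의 key를 기준으로 돌면서
--         cnt = 0
--
--         for i in value:                             # value들 중에서
--             if report_cnt[i] >= k:                  # 신고당한 횟수가 k 이상인 경우
--                 cnt += 1                            # 카운트
--
--         answer.append(cnt)
--
--     return answer
-- ===== SOURCE B (Python) =====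
-- from collections import Counter
--
-- def solution(id_list, report, k):
--     # Globally dedupe (reporter, target) pairs in first-occurrence order,
--     # count reports per target once, then tally per unique reporter.
--     pairs = list(dict.fromkeys(tuple(r.split()) for r in report))
--     cnt = Counter(t for _, t in pairs)
--     return [sum(1 for n, t in pairs if n == i and cnt[t] >= k)
--             for i in dict.fromkeys(id_list)]
-- ===== Notes on version B (the rewrite author's own statement) =====
-- stated objective: alternative
-- what changed: Replaces A's per-user set dictionary, concatenated-set Counter and per-set inner loops by one globally deduplicated (reporter,target) pair list: the target counter and each user's tally are computed by direct scans of that flat pair list.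
import Mathlib
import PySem

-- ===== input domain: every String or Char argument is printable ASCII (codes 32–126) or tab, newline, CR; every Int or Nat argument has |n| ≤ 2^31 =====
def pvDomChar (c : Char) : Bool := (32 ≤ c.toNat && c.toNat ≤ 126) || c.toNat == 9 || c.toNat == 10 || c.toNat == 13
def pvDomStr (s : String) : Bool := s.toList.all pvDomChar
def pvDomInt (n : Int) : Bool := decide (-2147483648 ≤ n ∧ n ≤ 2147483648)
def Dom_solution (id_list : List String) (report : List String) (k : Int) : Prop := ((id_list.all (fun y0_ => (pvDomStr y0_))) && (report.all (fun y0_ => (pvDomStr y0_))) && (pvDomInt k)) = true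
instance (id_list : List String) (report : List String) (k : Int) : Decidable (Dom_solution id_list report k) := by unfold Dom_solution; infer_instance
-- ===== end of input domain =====

-- B replaces A's per-user set dict + concatenated-set Counter by one globally
-- deduplicated (reporter, target) pair list scanned directly (objective: alternative).

-- ===== PORT A =====
def solution (id_list : List String) (report : List String) (k : Int) : List Int :=
  let db0 : PySem.Dict String (PySem.Set String) :=
    id_list.foldl (fun d id => d.insert id PySem.Set.empty) PySem.Dict.empty
  let db : PySem.Dict String (PySem.Set String) :=
    report.foldl (fun d r =>
      match PySem.Str.split₀ r with
      | [name, target] => d.modify name PySem.Set.empty (fun s => PySem.Set.add s target)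
      | _ => d) db0
  let report_cnt_list : List String :=
    db.keys.foldl (fun acc id =>
      if (db.getD id PySem.Set.empty) ≠ [] then acc ++ (db.getD id PySem.Set.empty) else acc) []
  let report_cnt : PySem.Dict String Int := PySem.Dict.counter report_cnt_list
  db.items.foldl (fun answer p =>
    answer ++ [p.2.foldl (fun cnt i => if report_cnt.getD i 0 ≥ k then cnt + 1 else cnt) (0 : Int)]) []

-- ===== PORT B =====
-- tuple(r.split()) when r splits into exactly two words (the only case Pre_ admits)
def pvParse (r : String) : String × String :=
  let ps := PySem.Str.split₀ r
  (ps.headI, ps.tail.headI)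

def solution_alt (id_list : List String) (report : List String) (k : Int) : List Int :=
  let pairs : List (String × String) := PySem.List.dedup (report.map pvParse)
  let cnt : PySem.Dict String Int := PySem.Dict.counter (pairs.map (fun p => p.2))
  (PySem.List.dedup id_list).map (fun i =>
    pairs.foldl (fun acc p =>
      if p.1 == i && decide (cnt.getD p.2 0 ≥ k) then acc + 1 else acc) (0 : Int))

-- ===== PRECONDITION & SPEC =====
-- Pre_ excludes exactly the inputs where the Python A raises: a report not splitting
-- into exactly two words (ValueError on unpacking) or a reporter absent from id_list
-- (KeyError on db[name]).
def Pre_solution (id_list : List String) (report : List String) (k : Int) : Prop :=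
  ∀ r ∈ report, (PySem.Str.split₀ r).length = 2 ∧ (PySem.Str.split₀ r).headI ∈ id_list
instance (id_list : List String) (report : List String) (k : Int) : Decidable (Pre_solution id_list report k) := by unfold Pre_solution; infer_instance

def pvWitness_solution : List String × List String × Int :=
  (["muzi", "frodo", "apeach", "neo"],
   ["muzi frodo", "apeach frodo", "frodo neo", "muzi neo", "apeach muzi"], 2)

def Spec_solution (id_list : List String) (report : List String) (k : Int) (out : List Int) : Prop := out = solution_alt id_list report k
instance (id_list : List String) (report : List String) (k : Int) (out : List Int) : Decidable (Spec_solution id_list report k out) := by unfold Spec_solution; infer_instance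

-- ===== CLAIM (what is proved, stated in full; the proofs are below) =====
def Claim_equal_solution : Prop := ∀ (id_list : List String) (report : List String) (k : Int), Dom_solution id_list report k → Pre_solution id_list report k → Spec_solution id_list report k (solution id_list report k)


-- ===== LEMMAS AND PROOFS =====
theorem pv_set_update_of_subset {α : Type} [BEq α] [LawfulBEq α] (xs : List α)
    (s : PySem.Set α) (h : ∀ x ∈ xs, x ∈ s) : PySem.Set.update s xs = s := by
  induction xs generalizing s with
  | nil => simp [PySem.Set.update]
  | cons x xs ih =>
    have hx : x ∈ s := h x (by simp)
    have hadd : PySem.Set.add s x = s := by simp [PySem.Set.add, hx]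
    show PySem.Set.update s (x :: xs) = s
    have : PySem.Set.update s (x :: xs) = PySem.Set.update (PySem.Set.add s x) xs := by
      simp [PySem.Set.update]
    rw [this, hadd]
    exact ih s (fun y hy => h y (by simp [hy]))

theorem pv_getD_initfold (l : List String) (d : PySem.Dict String (PySem.Set String))
    (h : ∀ x, d.getD x PySem.Set.empty = PySem.Set.empty) (x : String) :
    (l.foldl (fun d id => d.insert id PySem.Set.empty) d).getD x PySem.Set.empty
      = PySem.Set.empty := by
  induction l generalizing d with
  | nil => exact h x
  | cons a l ih =>
    refine ih _ (fun y => ?_)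
    rw [PySem.Dict.getD_insert]
    split
    · rfl
    · exact h y

theorem pv_getD_reportfold (P : List (String × String))
    (d : PySem.Dict String (PySem.Set String)) (x : String) :
    (P.foldl (fun d p => d.modify p.1 PySem.Set.empty (fun s => PySem.Set.add s p.2)) d).getD x PySem.Set.empty
      = ((P.filter (fun p => p.1 == x)).map (fun p => p.2)).foldl PySem.Set.add
          (d.getD x PySem.Set.empty) := by
  induction P generalizing d with
  | nil => simp
  | cons p P ih =>
    simp only [List.foldl_cons, ih, List.filter_cons]
    by_cases hx : p.1 = x
    · simp [hx]
    · simp [hx, PySem.Dict.getD_modify, Ne.symm hx]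

theorem pv_count_flatMap (uniq : List String) (S : String → PySem.Set String)
    (hS : ∀ id, (S id).Nodup) (t : String) :
    ((uniq.flatMap S).count t) = uniq.countP (fun id => decide (t ∈ S id)) := by
  induction uniq with
  | nil => simp
  | cons a l ih =>
    rw [List.flatMap_cons, List.count_append, List.countP_cons, ih]
    by_cases ht : t ∈ S a
    · rw [List.count_eq_one_of_mem (hS a) ht]; simp [ht]; omega
    · rw [List.count_eq_zero.mpr ht]; simp [ht]

-- Two nodup lists with the same members have the same length.
theorem pv_length_eq_of_nodup {α : Type} (l₁ l₂ : List α) (h₁ : l₁.Nodup) (h₂ : l₂.Nodup)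
    (h : ∀ a, a ∈ l₁ ↔ a ∈ l₂) : l₁.length = l₂.length :=
  ((List.perm_ext_iff_of_nodup h₁ h₂).mpr h).length_eq

-- On admitted reports, r.split() is exactly the two components of pvParse r.
theorem pv_parse_spec (r : String) (h : (PySem.Str.split₀ r).length = 2) :
    PySem.Str.split₀ r = [(pvParse r).1, (pvParse r).2] := by
  rcases hl : PySem.Str.split₀ r with _ | ⟨a, _ | ⟨b, _ | _⟩⟩ <;>
    simp_all [pvParse]

-- The targets a reporter x reported, in report order (with duplicates).
def pvTargets (P : List (String × String)) (x : String) : List String :=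
  (P.filter (fun p => p.1 == x)).map (fun p => p.2)

-- A's per-reporter set of reported targets.
def pvS (P : List (String × String)) (x : String) : PySem.Set String :=
  PySem.Set.ofList (pvTargets P x)

theorem pv_nodup_S (P : List (String × String)) (x : String) : (pvS P x).Nodup :=
  PySem.Set.nodup_ofList _

theorem pv_mem_S (P : List (String × String)) (x t : String) :
    t ∈ pvS P x ↔ (x, t) ∈ P := by
  simp only [pvS, pvTargets, PySem.Set.mem_ofList, List.mem_map, List.mem_filter]
  constructor
  · rintro ⟨p, ⟨hp, he⟩, rfl⟩
    have : p.1 = x := by simpa using he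
    simpa [← this] using hp
  · intro hp
    exact ⟨(x, t), ⟨hp, by simp⟩, rfl⟩

-- target counts agree: A counts t across the per-reporter sets, B in the deduped pair list
theorem pv_count_eq (id_list : List String) (P : List (String × String))
    (hfst : ∀ p ∈ P, p.1 ∈ id_list) (t : String) :
    ((PySem.Set.ofList id_list).flatMap (pvS P)).count t
      = ((PySem.List.dedup P).map (fun p => p.2)).count t := by
  rw [pv_count_flatMap (PySem.Set.ofList id_list) (pvS P) (fun id => pv_nodup_S P id) t,
    List.count_eq_countP, List.countP_map, List.countP_eq_length_filter,
    List.countP_eq_length_filter]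
  have hlen := pv_length_eq_of_nodup
    ((PySem.Set.ofList id_list).filter (fun id => decide (t ∈ pvS P id)))
    (((PySem.List.dedup P).filter (fun p => ((fun x => x == t) ∘ (fun p => p.2)) p)).map (fun p => p.1))
    ?_ ?_ ?_
  · rw [hlen, List.length_map]
  · exact (PySem.Set.nodup_ofList _).filter _
  · refine List.Nodup.map_on ?_ ((PySem.List.nodup_dedup _).filter _)
    intro p hp q hq h1
    have hp2 : p.2 = t := by simpa using (List.mem_filter.mp hp).2
    have hq2 : q.2 = t := by simpa using (List.mem_filter.mp hq).2
    exact Prod.ext h1 (hp2.trans hq2.symm)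
  · intro n
    simp only [List.mem_filter, PySem.Set.mem_ofList, List.mem_map, pv_mem_S,
      decide_eq_true_eq, Function.comp]
    constructor
    · rintro ⟨hn, hP⟩
      exact ⟨(n, t), ⟨(PySem.List.mem_dedup _ _).mpr hP, by simp⟩, rfl⟩
    · rintro ⟨p, hp, rfl⟩
      have hP : p ∈ P := (PySem.List.mem_dedup _ _).mp hp.1
      have : p.2 = t := by simpa using hp.2
      exact ⟨hfst p hP, by simpa [← this] using hP⟩

-- B's tally over the deduped pair list is A's tally over the reporter's set
theorem pv_countP_pairs (P : List (String × String)) (x : String) (q : String → Bool) :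
    (PySem.List.dedup P).countP (fun p => p.1 == x && q p.2)
      = (pvS P x).countP q := by
  have h1 : (fun p : String × String => p.1 == x && q p.2)
      = fun p => (q ∘ (fun p : String × String => p.2)) p && (fun p : String × String => p.1 == x) p := by
    funext p; simp [Bool.and_comm]
  rw [h1, ← List.countP_filter, ← List.countP_map]
  refine List.Perm.countP_eq _ ?_
  refine (List.perm_ext_iff_of_nodup ?_ (pv_nodup_S P x)).mpr ?_
  · refine List.Nodup.map_on ?_ ((PySem.List.nodup_dedup _).filter _)
    intro p hp r hr h2
    have hp1 : p.1 = x := by simpa using (List.mem_filter.mp hp).2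
    have hr1 : r.1 = x := by simpa using (List.mem_filter.mp hr).2
    exact Prod.ext (hp1.trans hr1.symm) h2
  · intro t
    rw [pv_mem_S]
    simp only [List.mem_map, List.mem_filter]
    constructor
    · rintro ⟨p, hp, rfl⟩
      have : p.1 = x := by simpa using hp.2
      have hP : p ∈ P := (PySem.List.mem_dedup _ _).mp hp.1
      simpa [← this] using hP
    · intro hP
      exact ⟨(x, t), ⟨(PySem.List.mem_dedup _ _).mpr hP, by simp⟩, rfl⟩

-- closed form of port A under Pre_
theorem pv_solutionA_eq (id_list : List String) (report : List String) (k : Int)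
    (hpre : Pre_solution id_list report k) :
    solution id_list report k
      = (PySem.Set.ofList id_list).map (fun x =>
          (0 : Int) + ((pvS (report.map pvParse) x).countP
            (fun i => decide (k ≤ (((PySem.Set.ofList id_list).flatMap
                (pvS (report.map pvParse))).count i : Int))) : Int)) := by
  have hpre2 : ∀ r ∈ report, PySem.Str.split₀ r = [(pvParse r).1, (pvParse r).2] :=
    fun r hr => pv_parse_spec r (hpre r hr).1
  have hfst : ∀ p ∈ report.map pvParse, p.1 ∈ id_list := by
    rintro p hp
    rcases List.mem_map.mp hp with ⟨r, hr, rfl⟩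
    have h := (hpre r hr).2
    rw [hpre2 r hr] at h
    simpa using h
  unfold solution
  dsimp only
  have h1 : (report.foldl (fun d r =>
        match PySem.Str.split₀ r with
        | [name, target] => d.modify name PySem.Set.empty (fun s => PySem.Set.add s target)
        | _ => d)
        (id_list.foldl (fun d id => d.insert id PySem.Set.empty) PySem.Dict.empty))
      = (report.map pvParse).foldl
          (fun d p => d.modify p.1 PySem.Set.empty (fun s => PySem.Set.add s p.2))
          (id_list.foldl (fun d id => d.insert id PySem.Set.empty) PySem.Dict.empty) := by
    rw [List.foldl_map]
    refine PySem.List.foldl_congr_mem report _ _ _ ?_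
    intro acc r hr
    rw [hpre2 r hr]
  rw [h1]
  have h2 : ∀ x, ((report.map pvParse).foldl
        (fun d p => d.modify p.1 PySem.Set.empty (fun s => PySem.Set.add s p.2))
        (id_list.foldl (fun d id => d.insert id PySem.Set.empty) PySem.Dict.empty)).getD x PySem.Set.empty
      = pvS (report.map pvParse) x := by
    intro x
    rw [pv_getD_reportfold,
      pv_getD_initfold id_list PySem.Dict.empty (fun y => PySem.Dict.getD_empty y _) x]
    simp [pvS, pvTargets, PySem.Set.ofList_eq_foldl]
  have h3 : ((report.map pvParse).foldl
        (fun d p => d.modify p.1 PySem.Set.empty (fun s => PySem.Set.add s p.2))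
        (id_list.foldl (fun d id => d.insert id PySem.Set.empty) PySem.Dict.empty)).keys
      = PySem.Set.ofList id_list := by
    rw [PySem.Dict.keys_foldl_modify_key (report.map pvParse)
        (fun p : String × String => p.1) PySem.Set.empty
        (fun _ p => fun s => PySem.Set.add s p.2),
      PySem.Dict.keys_foldl_insert id_list (fun _ _ => PySem.Set.empty) PySem.Dict.empty,
      PySem.Dict.keys_empty]
    have hupd0 : PySem.Set.update ([] : PySem.Set String) id_list = PySem.Set.ofList id_list := by
      simp [PySem.Set.update, PySem.Set.ofList_eq_foldl]
    rw [hupd0]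
    refine pv_set_update_of_subset _ _ ?_
    intro x hx
    rcases List.mem_map.mp hx with ⟨p, hp, rfl⟩
    exact (PySem.Set.mem_ofList _ _).mpr (hfst p hp)
  set dbt := (report.map pvParse).foldl
      (fun d p => d.modify p.1 PySem.Set.empty (fun s => PySem.Set.add s p.2))
      (id_list.foldl (fun d id => d.insert id PySem.Set.empty) PySem.Dict.empty) with hdbt
  have h4 : dbt.keys.Nodup := by rw [h3]; exact PySem.Set.nodup_ofList id_list
  rw [PySem.List.foldl_congr_mem dbt.keys _
      (fun acc id => acc ++ dbt.getD id PySem.Set.empty) []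
      (by intro acc id _
          split
          · rfl
          · simp_all),
    PySem.List.foldl_append_eq_flatMap (fun id => dbt.getD id PySem.Set.empty) dbt.keys [],
    PySem.Dict.items_eq_map_keys dbt h4 PySem.Set.empty]
  rw [List.foldl_map, PySem.List.foldl_append_singleton_eq_map]
  simp only [List.nil_append, h2, h3, ge_iff_le, PySem.Dict.getD_counter,
    PySem.List.foldl_ite_add_one]

-- closed form of port B
theorem pv_solutionB_eq (id_list : List String) (report : List String) (k : Int) :
    solution_alt id_list report k
      = (PySem.Set.ofList id_list).map (fun x =>
          (0 : Int) + (((PySem.List.dedup (report.map pvParse)).countP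
            (fun p => p.1 == x && decide (k ≤ (((PySem.List.dedup (report.map pvParse)).map
              (fun p => p.2)).count p.2 : Int)))) : Int)) := by
  unfold solution_alt
  rw [show PySem.List.dedup id_list = PySem.Set.ofList id_list from
    PySem.List.dedup_eq_ofList id_list]
  simp only [PySem.Dict.getD_counter, ge_iff_le, PySem.List.foldl_if_add_one]

-- ===== VERDICT (by name: the statement is the Claim_ definition above) =====
theorem solution_spec : Claim_equal_solution := by
  intro id_list report k _ hpre
  unfold Spec_solution
  rw [pv_solutionA_eq id_list report k hpre, pv_solutionB_eq id_list report k]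
  have hfst : ∀ p ∈ report.map pvParse, p.1 ∈ id_list := by
    rintro p hp
    rcases List.mem_map.mp hp with ⟨r, hr, rfl⟩
    have h := (hpre r hr).2
    rw [pv_parse_spec r (hpre r hr).1] at h
    simpa using h
  refine List.map_congr_left ?_
  intro x _
  congr 1
  rw [pv_countP_pairs (report.map pvParse) x
    (fun t => decide (k ≤ (((PySem.List.dedup (report.map pvParse)).map
      (fun p => p.2)).count t : Int)))]
  refine congrArg _ (List.countP_congr ?_)
  intro t _
  rw [pv_count_eq id_list (report.map pvParse) hfst t]
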